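-- pv_equiv track=rewrite | github.com/lvinnn/cs340-mps | mp6/app.py | rem_spaces
-- ===== SOURCE A (Python) =====
-- def rem_spaces(str):
--   for i in range(len(str)):
--     if str[i] != " ":
--       str = str[i:]
--       break
--   for i in range(len(str)):
--     if str[i] == " ":
--       str = str[:i]
--       break
--   return str
-- ===== SOURCE B (Python) =====
-- def rem_spaces(str):
--   buf = []
--   started = False
--   for ch in str:
--     if ch == " ":
--       if started:
--         break
--     else:
--       started = True
--       buf.append(ch)
--   return "".join(buf)
-- ===== Notes on version B (the rewrite author's own statement) =====
-- stated objective: alternative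
-- what changed: Replaces A's two index-based truncating passes (each re-slicing the string) with one forward scan that skips leading spaces and collects the first word into a buffer, breaking at the next space.
import Mathlib
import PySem

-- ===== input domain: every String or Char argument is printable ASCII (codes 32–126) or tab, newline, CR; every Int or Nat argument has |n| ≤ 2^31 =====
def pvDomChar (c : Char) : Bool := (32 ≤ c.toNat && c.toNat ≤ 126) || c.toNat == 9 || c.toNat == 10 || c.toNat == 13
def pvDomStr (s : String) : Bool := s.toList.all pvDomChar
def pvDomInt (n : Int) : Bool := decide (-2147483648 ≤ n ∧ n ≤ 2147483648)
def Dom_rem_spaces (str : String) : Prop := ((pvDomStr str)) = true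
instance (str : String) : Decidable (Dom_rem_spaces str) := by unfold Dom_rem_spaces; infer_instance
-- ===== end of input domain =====

-- B replaces A's two truncating passes with one forward scan building the word; same result proved below.

-- ===== PORT A =====
-- first loop of A: for i in range(len(str)): if str[i] != " ": str = str[i:]; break
-- indices come from range(len str) and str is unchanged until the break, so List.getD i ' '
-- and List.drop i are exact for Python's str[i] and str[i:] here (0 ≤ i < len).
def remLoop1 (s : List Char) : List Nat → List Char
  | [] => s
  | i :: rest => if s[i]?.getD ' ' ≠ ' ' then s.drop i else remLoop1 s rest

-- second loop of A: for i in range(len(str)): if str[i] == " ": str = str[:i]; break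
-- List.take i is exact for Python's str[:i] (0 ≤ i < len).
def remLoop2 (s : List Char) : List Nat → List Char
  | [] => s
  | i :: rest => if s[i]?.getD ' ' = ' ' then s.take i else remLoop2 s rest

def rem_spaces (str : String) : String :=
  let s1 := remLoop1 str.toList (List.range str.toList.length)
  let s2 := remLoop2 s1 (List.range s1.length)
  String.mk s2

-- ===== PORT B =====
-- one pass: skip leading spaces (started = false), then collect chars into buf, break at a space.
def altGo : List Char → Bool → List Char → List Char
  | [], _, buf => buf
  | ch :: rest, started, buf =>
    if ch = ' ' then (if started then buf else altGo rest started buf)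
    else altGo rest true (buf ++ [ch])

def rem_spaces_alt (str : String) : String :=
  String.mk (altGo str.toList false [])

-- ===== PRECONDITION & SPEC =====
def Spec_rem_spaces (str : String) (out : String) : Prop := out = rem_spaces_alt str
instance (str : String) (out : String) : Decidable (Spec_rem_spaces str out) := by unfold Spec_rem_spaces; infer_instance

-- ===== CLAIM (what is proved, stated in full; the proofs are below) =====
def Claim_equal_rem_spaces : Prop := ∀ (str : String), Dom_rem_spaces str → Spec_rem_spaces str (rem_spaces str)

-- ===== LEMMAS AND PROOFS =====

theorem remLoop1_shift (a : Char) (s : List Char) (idxs : List Nat) :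
    remLoop1 (a :: s) (idxs.map (· + 1)) =
      if idxs.any (fun i => s[i]?.getD ' ' ≠ ' ') then remLoop1 s idxs else a :: s := by
  induction idxs with
  | nil => simp [remLoop1]
  | cons i rest ih =>
    simp only [List.map_cons, remLoop1, List.getElem?_cons_succ, List.drop_succ_cons, List.any_cons]
    by_cases h : s[i]?.getD ' ' = ' ' <;> simp [h, ih]

theorem remLoop2_shift (a : Char) (s : List Char) (idxs : List Nat) :
    remLoop2 (a :: s) (idxs.map (· + 1)) = a :: remLoop2 s idxs := by
  induction idxs with
  | nil => simp [remLoop2]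
  | cons i rest ih =>
    simp only [List.map_cons, remLoop2, List.getElem?_cons_succ, List.take_succ_cons]
    by_cases h : s[i]?.getD ' ' = ' ' <;> simp [h, ih]

theorem any_range_getD (s : List Char) :
    (List.range s.length).any (fun i => s[i]?.getD ' ' ≠ ' ') = s.any (fun c => c ≠ ' ') := by
  induction s with
  | nil => simp
  | cons a s ih =>
    rw [List.length_cons, List.range_succ_eq_map]
    simp only [List.any_cons, List.getElem?_cons_zero, List.any_map, Function.comp_def,
      Nat.succ_eq_add_one, List.getElem?_cons_succ, Option.getD_some]
    exact congrArg (fun b => decide (a ≠ ' ') || b) ih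

theorem remLoop1_range (s : List Char) :
    remLoop1 s (List.range s.length) =
      if s.any (fun c => c ≠ ' ') then s.dropWhile (fun c => c = ' ') else s := by
  induction s with
  | nil => simp [remLoop1]
  | cons a s ih =>
    rw [List.length_cons, List.range_succ_eq_map]
    have hmap : List.map Nat.succ (List.range s.length) = (List.range s.length).map (· + 1) := by
      simp
    by_cases ha : a = ' '
    · subst ha
      simp only [remLoop1, List.getElem?_cons_zero, Option.getD_some]
      rw [if_neg (by simp), hmap, remLoop1_shift, any_range_getD, ih]
      by_cases hs : (s.any fun c => decide (c ≠ ' ')) = true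
      · rw [if_pos hs, if_pos hs, if_pos (by simpa using hs)]
        simp [List.dropWhile_cons]
      · rw [if_neg hs, if_neg (by simp [List.any_cons]; simpa using hs)]
    · simp only [remLoop1, List.getElem?_cons_zero, Option.getD_some]
      rw [if_pos (by simpa using ha), List.drop_zero,
        if_pos (by simp [List.any_cons, ha]), List.dropWhile_cons, if_neg (by simpa using ha)]

theorem remLoop2_range (s : List Char) :
    remLoop2 s (List.range s.length) = s.takeWhile (fun c => c ≠ ' ') := by
  induction s with
  | nil => simp [remLoop2]
  | cons a s ih =>
    rw [List.length_cons, List.range_succ_eq_map]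
    by_cases ha : a = ' '
    · simp [remLoop2, ha, List.takeWhile]
    · have hmap : List.map Nat.succ (List.range s.length) = (List.range s.length).map (· + 1) := by
        simp
      simp only [remLoop2, List.getElem?_cons_zero, ha, if_false, hmap]
      rw [remLoop2_shift, ih]
      simp [List.takeWhile, ha]

theorem altGo_started (s : List Char) (buf : List Char) :
    altGo s true buf = buf ++ s.takeWhile (fun c => c ≠ ' ') := by
  induction s generalizing buf with
  | nil => simp [altGo]
  | cons a s ih =>
    by_cases ha : a = ' '
    · simp [altGo, ha, List.takeWhile]
    · simp [altGo, ha, List.takeWhile, ih]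

theorem altGo_main (s : List Char) :
    altGo s false [] = (s.dropWhile (fun c => c = ' ')).takeWhile (fun c => c ≠ ' ') := by
  induction s with
  | nil => simp [altGo]
  | cons a s ih =>
    by_cases ha : a = ' '
    · simp [altGo, ha, List.dropWhile, ih]
    · simp [altGo, ha, List.dropWhile, List.takeWhile, altGo_started]

theorem all_space_takeWhile (s : List Char) (h : ¬ s.any (fun c => c ≠ ' ')) :
    s.takeWhile (fun c => c ≠ ' ') = [] := by
  cases s with
  | nil => rfl
  | cons a s =>
    simp only [List.any_cons, Bool.or_eq_true, not_or] at h
    have : a = ' ' := by simpa using h.1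
    simp [List.takeWhile, this]

-- ===== VERDICT (by name: the statement is the Claim_ definition above) =====
theorem rem_spaces_spec : Claim_equal_rem_spaces := by
  intro str _
  unfold Spec_rem_spaces rem_spaces rem_spaces_alt
  rw [altGo_main, remLoop1_range]
  by_cases hs : str.toList.any (fun c => c ≠ ' ')
  · simp only [hs, if_true, remLoop2_range]
  · have hfalse : (str.toList.any fun c => decide (c ≠ ' ')) = false := by
      simpa using hs
    simp only [hfalse, Bool.false_eq_true, if_false, remLoop2_range]
    rw [all_space_takeWhile _ hs]
    have : (str.toList.dropWhile (fun c => c = ' ')).takeWhile (fun c => c ≠ ' ') = [] := by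
      apply all_space_takeWhile
      intro hc
      exact hs (by
        rcases List.any_eq_true.mp hc with ⟨c, hm, hp⟩
        exact List.any_eq_true.mpr ⟨c, (List.dropWhile_sublist _).subset hm, hp⟩)
    rw [this]
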